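-- pv_equiv track=rewrite | github.com/anubhab-code/Competitive-Programming | CodeWars/7 Kyu/80's Kids #1 - How Many Licks Does it Take.py | total_licks
-- ===== SOURCE A (Python) =====
-- def total_licks(env):
--     if env == {}: return "It took 252 licks to get to the tootsie roll center of a tootsie pop."
--     cond_n = max(env.values())
--     for key in env:
--         if env[key] == cond_n:
--             con = key
--     i = 252
--     i += sum(env.values())
--     rep1 = f"It took {str(i)} licks to get to the tootsie roll center of a tootsie pop."
--     rep2 = f" The toughest challenge was {con}."
--     if cond_n > 0:
--         return rep1 + rep2
--     else:
--         return rep1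
-- ===== SOURCE B (Python) =====
-- def total_licks(env):
--     if not env:
--         return "It took 252 licks to get to the tootsie roll center of a tootsie pop."
--     ranked = sorted(env.items(), key=lambda kv: kv[1])
--     licks = 252 + sum(v for _, v in ranked)
--     key, val = ranked[-1]
--     msg = f"It took {licks} licks to get to the tootsie roll center of a tootsie pop."
--     if val > 0:
--         msg += f" The toughest challenge was {key}."
--     return msg
-- ===== Notes on version B (the rewrite author's own statement) =====
-- stated objective: alternative
-- what changed: A scans the dict three times (max of values, a key loop with dict lookups to find the last max key, a sum); B instead stably sorts the items by value and reads both the max value and the last max-valued key off the last element of the sorted list (stability makes the last element the last-inserted tie), then sums once.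
import Mathlib
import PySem

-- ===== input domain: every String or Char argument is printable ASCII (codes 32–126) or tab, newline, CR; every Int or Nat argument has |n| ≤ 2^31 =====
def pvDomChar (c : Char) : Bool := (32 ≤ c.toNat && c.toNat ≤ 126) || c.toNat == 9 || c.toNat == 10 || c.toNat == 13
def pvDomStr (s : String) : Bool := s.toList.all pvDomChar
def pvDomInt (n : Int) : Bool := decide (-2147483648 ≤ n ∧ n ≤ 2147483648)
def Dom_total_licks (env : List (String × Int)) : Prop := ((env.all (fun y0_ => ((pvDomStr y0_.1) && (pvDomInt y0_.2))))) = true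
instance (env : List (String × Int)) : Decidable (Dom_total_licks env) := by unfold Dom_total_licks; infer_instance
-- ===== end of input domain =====

-- B replaces A's three dict scans (max of values, key loop for the last max key, sum) by a
-- stable sort of the items by value: the last sorted element carries both the max value and
-- the last max-valued key; objective: alternative.

-- ===== PORT A =====
-- env[key]: first match in the association list (keys are unique under Pre_); default never reached
def pyDictGet (env : List (String × Int)) (k : String) : Int :=
  ((env.find? (fun p => p.1 == k)).map (·.2)).getD 0

def total_licks (env : List (String × Int)) : String :=
  if env = [] then "It took 252 licks to get to the tootsie roll center of a tootsie pop."
  else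
    let cond_n : Int := (PySem.List.max? (env.map (·.2)) (fun x => x)).getD 0
    -- for key in env: if env[key] == cond_n: con = key   (con unassigned before the loop → Option)
    let con : Option String :=
      (env.map (·.1)).foldl (fun acc k => if pyDictGet env k = cond_n then some k else acc) none
    let i : Int := 252 + (env.map (·.2)).sum
    let rep1 := "It took " ++ PySem.Int.toStr i ++ " licks to get to the tootsie roll center of a tootsie pop."
    let rep2 := " The toughest challenge was " ++ con.getD "" ++ "."
    if cond_n > 0 then rep1 ++ rep2 else rep1

-- ===== PORT B =====
def total_licks_alt (env : List (String × Int)) : String :=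
  if env = [] then "It took 252 licks to get to the tootsie roll center of a tootsie pop."
  else
    let ranked := PySem.List.sorted env (fun kv => kv.2) false
    let licks : Int := 252 + (ranked.map (·.2)).sum
    -- ranked[-1]: IndexError on an empty list — unreachable here since env ≠ []
    match PySem.List.pyGet? ranked (-1) with
    | none => ""
    | some (key, val) =>
      let msg := "It took " ++ PySem.Int.toStr licks ++ " licks to get to the tootsie roll center of a tootsie pop."
      if val > 0 then msg ++ (" The toughest challenge was " ++ key ++ ".") else msg

-- ===== PRECONDITION & SPEC =====
-- Pre_ excludes association lists with duplicate keys: they do not represent a Python dict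
-- (both Pythons receive a dict, in which keys are unique), so the list form is outside the claim.
def Pre_total_licks (env : List (String × Int)) : Prop := (env.map Prod.fst).Nodup
instance (env : List (String × Int)) : Decidable (Pre_total_licks env) := by unfold Pre_total_licks; infer_instance
def pvWitness_total_licks : (List (String × Int)) := [("lollipop", 3), ("kale", -1)]

def Spec_total_licks (env : List (String × Int)) (out : String) : Prop := out = total_licks_alt env
instance (env : List (String × Int)) (out : String) : Decidable (Spec_total_licks env out) := by unfold Spec_total_licks; infer_instance

-- ===== CLAIM (what is proved, stated in full; the proofs are below) =====
def Claim_equal_total_licks : Prop := ∀ (env : List (String × Int)), Dom_total_licks env → Pre_total_licks env → Spec_total_licks env (total_licks env)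

-- ===== LEMMAS AND PROOFS =====

-- running max over the values of l, seeded with v
def fmax (v : Int) (l : List (String × Int)) : Int := l.foldl (fun m p => max m p.2) v
-- last key of l whose value equals c, seeded with a
def occ (c : Int) (l : List (String × Int)) (a : Option String) : Option String :=
  l.foldl (fun acc p => if p.2 = c then some p.1 else acc) a
-- the pair a stable sort by value ends with: later wins ties (≥)
def bstep (acc : Option (String × Int)) (p : String × Int) : Option (String × Int) :=
  match acc with
  | none => some p
  | some q => if p.2 ≥ q.2 then some p else some q

theorem occ_cons (c : Int) (p : String × Int) (t : List (String × Int)) (a : Option String) :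
    occ c (p :: t) a = occ c t (if p.2 = c then some p.1 else a) := rfl

theorem occ_acc (c : Int) (t : List (String × Int)) (a : Option String) :
    occ c t a = match occ c t none with | some k => some k | none => a := by
  induction t generalizing a with
  | nil => simp [occ]
  | cons p t ih =>
    rw [occ_cons, occ_cons, ih, ih (if p.2 = c then some p.1 else none)]
    cases h : occ c t none <;> split_ifs <;> simp

theorem occ_none (c : Int) (t : List (String × Int)) :
    occ c t none = none → ∀ p ∈ t, p.2 ≠ c := by
  induction t with
  | nil => intro _ p hp; simp at hp
  | cons q t ih =>
    intro h p hp
    rw [occ_cons, occ_acc] at h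
    cases hq : occ c t none
    · rw [hq] at h
      simp only [] at h
      split_ifs at h with he
      rcases List.mem_cons.mp hp with rfl | hp'
      · exact he
      · exact ih hq p hp'
    · rw [hq] at h
      simp at h

theorem le_fmax (t : List (String × Int)) (v : Int) : v ≤ fmax v t := by
  induction t generalizing v with
  | nil => simp [fmax]
  | cons p t ih =>
    have h : fmax v (p :: t) = fmax (max v p.2) t := rfl
    rw [h]
    exact le_trans (le_max_left _ _) (ih _)

theorem fmax_mem (t : List (String × Int)) (v : Int) :
    fmax v t = v ∨ ∃ p ∈ t, p.2 = fmax v t := by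
  induction t generalizing v with
  | nil => left; rfl
  | cons p t ih =>
    have hc : fmax v (p :: t) = fmax (max v p.2) t := rfl
    rcases ih (max v p.2) with h | ⟨q, hq, hq2⟩
    · rw [hc, h]
      rcases max_choice v p.2 with h2 | h2
      · left; omega
      · right; exact ⟨p, by simp, by omega⟩
    · right; exact ⟨q, List.mem_cons_of_mem _ hq, by rw [hc]; exact hq2⟩

-- the last key with the max value: A's scan over p :: t equals the "getD p.1" form over t
theorem occ_head (t : List (String × Int)) (p : String × Int) :
    occ (fmax p.2 t) (p :: t) none = some ((occ (fmax p.2 t) t none).getD p.1) := by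
  rw [occ_cons, occ_acc]
  cases h : occ (fmax p.2 t) t none with
  | some k => simp
  | none =>
    have hpM : p.2 = fmax p.2 t := by
      rcases fmax_mem t p.2 with h2 | ⟨q, hq, hq2⟩
      · omega
      · exact absurd hq2 (occ_none _ t h q hq)
    simp [← hpM]

-- the bstep fold, fully characterised from a non-none state
theorem bfold_inv (t : List (String × Int)) (k : String) (v : Int) :
    t.foldl bstep (some (k, v)) =
      some ((occ (fmax v t) t none).getD k, fmax v t) := by
  induction t generalizing k v with
  | nil => simp [fmax, occ]
  | cons p t ih =>
    have hstep : bstep (some (k, v)) p =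
        if p.2 ≥ v then some (p.1, p.2) else some (k, v) := by
      simp only [bstep]
    rw [List.foldl_cons, hstep]
    by_cases h : p.2 ≥ v
    · rw [if_pos h, ih]
      have hm : fmax v (p :: t) = fmax p.2 t := by
        show fmax (max v p.2) t = fmax p.2 t
        congr 1; omega
      rw [hm, occ_head t p]
      simp
    · rw [if_neg h, ih]
      have hm : fmax v (p :: t) = fmax v t := by
        show fmax (max v p.2) t = fmax v t
        congr 1; omega
      have hne : p.2 ≠ fmax v t := by
        have := le_fmax t v; omega
      rw [hm, occ_cons, if_neg hne]

-- insertBy never returns []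
theorem insertBy_ne_nil (bef : (String × Int) → (String × Int) → Bool)
    (x : String × Int) (ys : List (String × Int)) :
    PySem.List.insertBy bef x ys ≠ [] := by
  cases ys with
  | nil => simp [PySem.List.insertBy]
  | cons y ys => simp only [PySem.List.insertBy]; split_ifs <;> simp

-- inserting into a value-sorted list: the last element is the ≥-winner of x and the old last
theorem getLast?_insertBy (x : String × Int) (ys : List (String × Int))
    (hs : ys.Pairwise (fun a b => a.2 ≤ b.2)) :
    (PySem.List.insertBy (fun a b => decide (a.2 < b.2)) x ys).getLast? =
      match ys.getLast? with
      | none => some x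
      | some q => if x.2 ≥ q.2 then some x else some q := by
  induction ys with
  | nil => simp [PySem.List.insertBy]
  | cons y ys ih =>
    rw [List.pairwise_cons] at hs
    simp only [PySem.List.insertBy]
    by_cases h : x.2 < y.2
    · rw [if_pos (by simpa using h)]
      cases hys : ys.getLast? with
      | none =>
        have : ys = [] := by cases ys <;> simp_all
        subst this
        simp [show ¬ x.2 ≥ y.2 by omega]
      | some q =>
        have hq : q ∈ ys := List.mem_of_getLast? hys
        have hyq : y.2 ≤ q.2 := hs.1 q hq
        have h1 : ((y :: ys).getLast?) = some q := by
          cases ys with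
          | nil => simp at hys
          | cons a l => rw [List.getLast?_cons_cons, hys]
        have h2 : ((x :: y :: ys).getLast?) = some q := by
          rw [List.getLast?_cons_cons, h1]
        rw [h2, h1]
        simp [show ¬ x.2 ≥ q.2 by omega]
    · rw [if_neg (by simpa using h)]
      have hne := insertBy_ne_nil (fun a b => decide (a.2 < b.2)) x ys
      cases ys with
      | nil =>
        simp [PySem.List.insertBy, show x.2 ≥ y.2 by omega]
      | cons a l =>
        have h3 : ((y :: PySem.List.insertBy (fun a b => decide (a.2 < b.2)) x (a :: l)).getLast?)
            = (PySem.List.insertBy (fun a b => decide (a.2 < b.2)) x (a :: l)).getLast? := by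
          cases hh : PySem.List.insertBy (fun a b => decide (a.2 < b.2)) x (a :: l) with
          | nil => exact absurd hh hne
          | cons b m => rw [List.getLast?_cons_cons]
        rw [h3, ih hs.2, List.getLast?_cons_cons]

-- the last element of the stable sort by value is the bstep fold over the original list
theorem getLast?_sorted (env : List (String × Int)) :
    (PySem.List.sorted env (fun kv => kv.2) false).getLast? = env.foldl bstep none := by
  induction env using List.reverseRecOn with
  | nil => simp [PySem.List.sorted_eq_nil_iff]
  | append_singleton l p ih =>
    rw [PySem.List.sorted_eq_foldl_insertBy, List.foldl_append, List.foldl_cons, List.foldl_nil,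
        ← PySem.List.sorted_eq_foldl_insertBy,
        getLast?_insertBy p _ (PySem.List.sorted_pairwise l (fun kv => kv.2)),
        PySem.List.sorted_eq_foldl_insertBy, ← PySem.List.sorted_eq_foldl_insertBy, ih,
        List.foldl_append, List.foldl_cons, List.foldl_nil]
    cases h : l.foldl bstep none with
    | none => rfl
    | some q => simp [bstep]

-- ranked[-1] on a nonempty list is its last element
theorem pyGet?_neg_one (xs : List (String × Int)) (h : xs ≠ []) :
    PySem.List.pyGet? xs (-1) = xs.getLast? := by
  have hl : 0 < xs.length := List.length_pos_iff.mpr h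
  simp only [PySem.List.pyGet?, PySem.List.pyIdx?]
  rw [if_neg (by omega), if_pos (by omega)]
  simp only [Option.bind_some]
  rw [List.getLast?_eq_getElem?]
  congr 1

-- A's key-scan with dict lookups equals the direct scan over the pairs (unique keys)
theorem keyscan_eq (full : List (String × Int)) :
    ∀ (env : List (String × Int)), (env.map Prod.fst).Nodup →
    (∀ p ∈ env, pyDictGet full p.1 = p.2) →
    ∀ (c : Int) (a : Option String),
      (env.map (·.1)).foldl (fun acc k => if pyDictGet full k = c then some k else acc) a
        = occ c env a := by
  intro env
  induction env with
  | nil => intro _ _ c a; rfl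
  | cons p t ih =>
    intro hnd hget c a
    have hp : pyDictGet full p.1 = p.2 := hget p (by simp)
    simp only [List.map_cons, List.foldl_cons, hp, occ_cons]
    exact ih (by rw [List.map_cons, List.nodup_cons] at hnd; exact hnd.2)
      (fun q hq => hget q (List.mem_cons_of_mem _ hq)) c _

theorem self_lookup (env : List (String × Int)) :
    (env.map Prod.fst).Nodup → ∀ p ∈ env, pyDictGet env p.1 = p.2 := by
  induction env with
  | nil => intro _ p hp; simp at hp
  | cons q t ih =>
    intro hnd p hp
    rw [List.map_cons, List.nodup_cons] at hnd
    rcases List.mem_cons.mp hp with rfl | hp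
    · simp [pyDictGet]
    · have hne : q.1 ≠ p.1 := fun h => hnd.1 (h ▸ List.mem_map.mpr ⟨p, hp, rfl⟩)
      have hfind : List.find? (fun r => r.1 == p.1) (q :: t) = List.find? (fun r => r.1 == p.1) t := by
        rw [List.find?_cons_of_neg]
        simpa using hne
      simp only [pyDictGet, hfind]
      exact ih hnd.2 p hp

-- ===== VERDICT (by name: the statement is the Claim_ definition above) =====
theorem total_licks_spec : Claim_equal_total_licks := by
  intro env _ hpre
  unfold Spec_total_licks total_licks total_licks_alt
  cases env with
  | nil => rfl
  | cons p t =>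
    simp only [reduceCtorEq, if_false]
    have hmax : (PySem.List.max? ((p :: t).map (·.2)) (fun x => x)).getD 0 = fmax p.2 t := by
      rw [List.map_cons, PySem.List.max?_id_cons]
      simp [fmax, List.foldl_map]
    have hcon : ((p :: t).map (·.1)).foldl
        (fun acc k => if pyDictGet (p :: t) k = fmax p.2 t then some k else acc) none
        = some ((occ (fmax p.2 t) t none).getD p.1) := by
      rw [keyscan_eq (p :: t) (p :: t) hpre (self_lookup _ hpre)]
      exact occ_head t p
    have hlast : PySem.List.pyGet? (PySem.List.sorted (p :: t) (fun kv => kv.2) false) (-1)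
        = some ((occ (fmax p.2 t) t none).getD p.1, fmax p.2 t) := by
      rw [pyGet?_neg_one _ (by rw [ne_eq, PySem.List.sorted_eq_nil_iff]; simp),
          getLast?_sorted, List.foldl_cons]
      show List.foldl bstep (some (p.1, p.2)) t = _
      rw [bfold_inv]
    have hsum : ((PySem.List.sorted (p :: t) (fun kv => kv.2) false).map (·.2)).sum
        = ((p :: t).map (·.2)).sum :=
      ((PySem.List.sorted_perm (p :: t) (fun kv => kv.2) false).map (·.2)).sum_eq
    simp only [hmax, hcon, hlast, hsum]
    split_ifs <;> simp
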